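-- pv_equiv track=rewrite | github.com/rafaelcgama/interviews | interview_questions/color/color.py | bulbs2
-- ===== SOURCE A (Python) =====
-- def bulbs2(arr):
--     if sum(arr) == len(arr):
--         return 0
--
--     total, flipped = 0, False
--     for a in arr:
--         if a == 0 and not flipped:
--             flipped, total = True, total + 1
--
--         elif a == 1 and flipped:
--             flipped, total = False, total + 1
--
--     return total
-- ===== SOURCE B (Python) =====
-- def bulbs2(arr):
--     if sum(arr) == len(arr):
--         return 0
--     filtered = [a for a in arr if a == 0 or a == 1]
--     if not filtered:
--         return 0
--     runs = 1 + sum(1 for x, y in zip(filtered, filtered[1:]) if x != y)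
--     return runs - (1 if filtered[0] == 1 else 0)
-- ===== Notes on version B (the rewrite author's own statement) =====
-- stated objective: alternative
-- what changed: Replaces the online flipped/total boolean state machine with a build-then-count decomposition: filter the 0/1 subsequence, count its run boundaries via adjacent pairs (zip), and adjust for a leading run of 1s.
import Mathlib
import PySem

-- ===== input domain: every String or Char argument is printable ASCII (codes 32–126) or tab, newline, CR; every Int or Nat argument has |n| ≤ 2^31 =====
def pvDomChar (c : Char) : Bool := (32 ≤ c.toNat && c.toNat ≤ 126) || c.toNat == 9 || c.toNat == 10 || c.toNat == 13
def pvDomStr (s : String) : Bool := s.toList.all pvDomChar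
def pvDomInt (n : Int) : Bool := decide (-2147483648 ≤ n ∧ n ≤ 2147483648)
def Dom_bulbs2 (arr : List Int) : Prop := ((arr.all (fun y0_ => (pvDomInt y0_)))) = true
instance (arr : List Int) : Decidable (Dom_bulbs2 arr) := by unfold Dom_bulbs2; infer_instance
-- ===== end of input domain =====

-- B replaces A's online boolean state machine with filter + adjacent-pair run counting; same O(n) cost, different decomposition.

-- ===== PORT A =====
-- A's loop step: (total, flipped) updated per element, branches in A's order
def bulbs2Step (s : Int × Bool) (a : Int) : Int × Bool :=
  if a = 0 ∧ ¬ s.2 then (s.1 + 1, true)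
  else if a = 1 ∧ s.2 then (s.1 + 1, false)
  else s

def bulbs2 (arr : List Int) : Int :=
  if arr.sum = (arr.length : Int) then 0
  else (arr.foldl bulbs2Step (0, false)).1

-- ===== PORT B =====
def bulbs2_alt (arr : List Int) : Int :=
  if arr.sum = (arr.length : Int) then 0
  else
    let filtered := arr.filter (fun a => a = 0 ∨ a = 1)
    if filtered = [] then 0
    else
      let runs : Int :=
        1 + (filtered.zip (filtered.drop 1)).foldl
              (fun s p => if p.1 ≠ p.2 then s + 1 else s) 0
      runs - (if filtered[0]! = 1 then 1 else 0)

-- ===== PRECONDITION & SPEC =====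
def Spec_bulbs2 (arr : List Int) (out : Int) : Prop := out = bulbs2_alt arr
instance (arr : List Int) (out : Int) : Decidable (Spec_bulbs2 arr out) := by unfold Spec_bulbs2; infer_instance

-- ===== CLAIM (what is proved, stated in full; the proofs are below) =====
def Claim_equal_bulbs2 : Prop := ∀ (arr : List Int), Dom_bulbs2 arr → Spec_bulbs2 arr (bulbs2 arr)

-- ===== LEMMAS AND PROOFS =====

-- boundary count of a list, as B's zip-fold computes it starting from 0
def zcount (l : List Int) : Int :=
  (l.zip (l.drop 1)).foldl (fun s p => if p.1 ≠ p.2 then s + 1 else s) 0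

theorem zfold_shift (ps : List (Int × Int)) (s : Int) :
    ps.foldl (fun s p => if p.1 ≠ p.2 then s + 1 else s) s
      = s + ps.foldl (fun s p => if p.1 ≠ p.2 then s + 1 else s) 0 := by
  induction ps generalizing s with
  | nil => simp
  | cons p ps ih =>
    simp only [List.foldl_cons]
    rw [ih, ih (if p.1 ≠ p.2 then 0 + 1 else 0)]
    split <;> ring

theorem zcount_cons (v a : Int) (l : List Int) :
    zcount (v :: a :: l) = (if v ≠ a then 1 else 0) + zcount (a :: l) := by
  simp only [zcount, List.drop_succ_cons, List.drop_zero, List.zip_cons_cons, List.foldl_cons]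
  rw [zfold_shift]
  split <;> ring

-- A's loop over a 0/1 list starting from (t, f): total = t + boundaries of (rep f :: l)
theorem step_run (l : List Int) (hb : ∀ a ∈ l, a = 0 ∨ a = 1) (t : Int) (f : Bool) :
    (l.foldl bulbs2Step (t, f)).1 = t + zcount ((if f then 0 else 1) :: l) := by
  induction l generalizing t f with
  | nil => simp [zcount]
  | cons a l ih =>
    have ha := hb a (by simp)
    have hb' : ∀ x ∈ l, x = 0 ∨ x = 1 := fun x hx => hb x (by simp [hx])
    rcases ha with ha | ha <;> subst ha
    · cases f with
      | false =>
        simp only [List.foldl_cons, bulbs2Step]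
        norm_num
        rw [ih hb' (t + 1) true, zcount_cons]
        norm_num; ring
      | true =>
        simp only [List.foldl_cons, bulbs2Step]
        norm_num
        rw [ih hb' t true, zcount_cons]
        norm_num
    · cases f with
      | false =>
        simp only [List.foldl_cons, bulbs2Step]
        norm_num
        rw [ih hb' t false, zcount_cons]
        norm_num
      | true =>
        simp only [List.foldl_cons, bulbs2Step]
        norm_num
        rw [ih hb' (t + 1) false, zcount_cons]
        norm_num; ring

-- non-0/1 elements are no-ops for A's loop: fold over arr = fold over the filtered list
theorem foldl_filter_step (arr : List Int) (s : Int × Bool) :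
    arr.foldl bulbs2Step s = (arr.filter (fun a => a = 0 ∨ a = 1)).foldl bulbs2Step s := by
  induction arr generalizing s with
  | nil => rfl
  | cons a l ih =>
    by_cases h : a = 0 ∨ a = 1
    · simp [h, ih]
    · push Not at h
      have hstep : bulbs2Step s a = s := by
        simp [bulbs2Step, h.1, h.2]
      simp [h.1, h.2, hstep, ih]

-- closed form of B's branch value for a 0/1 list, equal to the boundary count with a virtual leading 1
theorem alt_closed (l : List Int) (hb : ∀ a ∈ l, a = 0 ∨ a = 1) :
    zcount ((1:Int) :: l)
      = (if l = [] then 0 else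
          1 + (l.zip (l.drop 1)).foldl (fun s p => if p.1 ≠ p.2 then s + 1 else s) 0
            - (if l[0]! = 1 then 1 else 0)) := by
  cases l with
  | nil => simp [zcount]
  | cons h rest =>
    simp only [if_neg (List.cons_ne_nil h rest)]
    have hz : ((h :: rest).zip ((h :: rest).drop 1)).foldl
        (fun s p => if p.1 ≠ p.2 then s + 1 else s) 0 = zcount (h :: rest) := rfl
    rw [hz, zcount_cons]
    rcases hb h (by simp) with hh | hh <;> subst hh
    · norm_num
    · norm_num

-- ===== VERDICT (by name: the statement is the Claim_ definition above) =====
theorem bulbs2_spec : Claim_equal_bulbs2 := by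
  intro arr _
  unfold Spec_bulbs2 bulbs2 bulbs2_alt
  split
  · rfl
  · have hb : ∀ a ∈ arr.filter (fun a => a = 0 ∨ a = 1), a = 0 ∨ a = 1 := by
      intro a ha
      simpa using (List.of_mem_filter ha)
    rw [foldl_filter_step, step_run _ hb 0 false]
    simpa using (alt_closed _ hb)
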